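-- pv_equiv track=rewrite | github.com/AlertBear/fcior | src/lib/python/common.py | get_domain_vfs_hotplug_status
-- ===== SOURCE A (Python) =====
-- def get_domain_vfs_hotplug_status(
--         status_dict,
--         test_vfs_in_iod):
--     """
--     Purpose:
--         Get VFs hotplug_status during the root domain interrupted
--     Arguments:
--         status_dicts - All VFs hotplug_status dict
--         test_vfs_in_iod - Test vfs in IO domain
--         test_class - Check FC/NIC/IB vfs status
--     Return:
--         hotplug_status - e.g."ONLINE"
--     """
--     offline_flag = 0
--     maintenance_suspend_flag = 0
--
--     for vf, vf_info in test_vfs_in_iod.items():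
--         if status_dict.get(vf)[0] != 'ONLINE':
--             if status_dict.get(vf)[0] == 'OFFLINE':
--                 offline_flag += 1
--             elif status_dict.get(vf)[0] == 'MAINTENANCE-SUSPENDED':
--                 maintenance_suspend_flag += 1
--             else:
--                 pass
--
--     # If all the vf are OFFLINE, the status can ensure to be OFFLINE
--     if offline_flag == 0:
--         hotplug_status = 'ONLINE'
--     elif offline_flag == len(test_vfs_in_iod.keys()):
--         hotplug_status = 'OFFLINE'
--     else:
--         hotplug_status = 'MIX-OFFLNE'
--     if maintenance_suspend_flag == 0:
--         pass
--     elif maintenance_suspend_flag == len(test_vfs_in_iod.keys()):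
--         hotplug_status = 'MAINTENANCE-SUSPENDED'
--     else:
--         hotplug_status = 'MIX-MAINTENANCE-SUSPENDED'
--     return hotplug_status
-- ===== SOURCE B (Python) =====
-- def get_domain_vfs_hotplug_status(status_dict, test_vfs_in_iod):
--     seen = set(status_dict.get(vf)[0] for vf in test_vfs_in_iod)
--     if 'OFFLINE' not in seen:
--         hotplug_status = 'ONLINE'
--     elif seen == {'OFFLINE'}:
--         hotplug_status = 'OFFLINE'
--     else:
--         hotplug_status = 'MIX-OFFLNE'
--     if 'MAINTENANCE-SUSPENDED' in seen:
--         if seen == {'MAINTENANCE-SUSPENDED'}: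
--             hotplug_status = 'MAINTENANCE-SUSPENDED'
--         else:
--             hotplug_status = 'MIX-MAINTENANCE-SUSPENDED'
--     return hotplug_status
-- ===== Notes on version B (the rewrite author's own statement) =====
-- stated objective: alternative
-- what changed: Replaces A's two running counters over the vf loop with a one-shot set of the observed lead statuses, deciding the summary by set membership and set equality instead of count arithmetic.
import Mathlib
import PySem

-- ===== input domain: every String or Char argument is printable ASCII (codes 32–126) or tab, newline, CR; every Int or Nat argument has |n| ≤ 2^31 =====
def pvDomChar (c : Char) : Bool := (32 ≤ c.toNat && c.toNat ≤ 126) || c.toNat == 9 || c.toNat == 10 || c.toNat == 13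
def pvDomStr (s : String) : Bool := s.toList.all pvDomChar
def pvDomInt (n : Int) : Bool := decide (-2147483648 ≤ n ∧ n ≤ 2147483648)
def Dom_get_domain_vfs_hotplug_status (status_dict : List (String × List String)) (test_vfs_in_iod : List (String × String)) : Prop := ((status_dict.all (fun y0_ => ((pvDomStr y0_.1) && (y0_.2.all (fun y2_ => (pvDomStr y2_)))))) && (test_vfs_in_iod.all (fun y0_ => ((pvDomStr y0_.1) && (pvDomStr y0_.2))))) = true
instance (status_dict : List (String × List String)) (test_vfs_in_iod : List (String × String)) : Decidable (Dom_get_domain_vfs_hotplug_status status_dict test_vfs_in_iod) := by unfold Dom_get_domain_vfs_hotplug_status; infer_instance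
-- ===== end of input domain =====

-- B replaces A's two running counters with a set of observed lead statuses and decides the
-- summary by set membership/equality (objective: alternative decomposition, same cost).

-- ===== PORT A =====
-- status_dict.get(vf)[0], total-ized: Pre_ guarantees the key is present with a nonempty list
def pvLead (s : PySem.Dict String (List String)) (vf : String) : String :=
  (((s.get? vf).getD []).headD "")

-- the body of A's for-loop (branch order as in the Python)
def pvStep (acc : Int × Int) (st : String) : Int × Int :=
  if st ≠ "ONLINE" then
    if st = "OFFLINE" then (acc.1 + 1, acc.2)
    else if st = "MAINTENANCE-SUSPENDED" then (acc.1, acc.2 + 1)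
    else acc
  else acc

def get_domain_vfs_hotplug_status (status_dict : List (String × List String)) (test_vfs_in_iod : List (String × String)) : String :=
  let s := PySem.Dict.ofList status_dict
  let d := PySem.Dict.ofList test_vfs_in_iod
  let acc := d.items.foldl (fun acc p => pvStep acc (pvLead s p.1)) (0, 0)
  let hotplug_status :=
    if acc.1 = 0 then "ONLINE"
    else if acc.1 = (d.keys.length : Int) then "OFFLINE"
    else "MIX-OFFLNE"
  if acc.2 = 0 then hotplug_status
  else if acc.2 = (d.keys.length : Int) then "MAINTENANCE-SUSPENDED"
  else "MIX-MAINTENANCE-SUSPENDED"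

-- ===== PORT B =====
def get_domain_vfs_hotplug_status_alt (status_dict : List (String × List String)) (test_vfs_in_iod : List (String × String)) : String :=
  let s := PySem.Dict.ofList status_dict
  let seen : PySem.Set String :=
    PySem.Set.ofList ((PySem.Dict.ofList test_vfs_in_iod).keys.map (fun vf => pvLead s vf))
  let hotplug_status :=
    if PySem.Set.contains seen "OFFLINE" = false then "ONLINE"
    else if PySem.Set.equal seen ["OFFLINE"] then "OFFLINE"
    else "MIX-OFFLNE"
  if PySem.Set.contains seen "MAINTENANCE-SUSPENDED" then
    if PySem.Set.equal seen ["MAINTENANCE-SUSPENDED"] then "MAINTENANCE-SUSPENDED"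
    else "MIX-MAINTENANCE-SUSPENDED"
  else hotplug_status

-- ===== PRECONDITION & SPEC =====
-- Pre_ excludes exactly the inputs on which Python A raises: a test vf whose status_dict entry
-- is missing (TypeError on None[0]) or an empty status list (IndexError).
def Pre_get_domain_vfs_hotplug_status (status_dict : List (String × List String)) (test_vfs_in_iod : List (String × String)) : Prop :=
  ∀ p ∈ test_vfs_in_iod, ((PySem.Dict.ofList status_dict).get? p.1).getD [] ≠ []
instance (status_dict : List (String × List String)) (test_vfs_in_iod : List (String × String)) : Decidable (Pre_get_domain_vfs_hotplug_status status_dict test_vfs_in_iod) := by unfold Pre_get_domain_vfs_hotplug_status; infer_instance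

def pvWitness_get_domain_vfs_hotplug_status : (List (String × List String)) × (List (String × String)) :=
  ([("vf0", ["ONLINE"]), ("vf1", ["OFFLINE"])], [("vf0", "a"), ("vf1", "b")])

def Spec_get_domain_vfs_hotplug_status (status_dict : List (String × List String)) (test_vfs_in_iod : List (String × String)) (out : String) : Prop := out = get_domain_vfs_hotplug_status_alt status_dict test_vfs_in_iod
instance (status_dict : List (String × List String)) (test_vfs_in_iod : List (String × String)) (out : String) : Decidable (Spec_get_domain_vfs_hotplug_status status_dict test_vfs_in_iod out) := by unfold Spec_get_domain_vfs_hotplug_status; infer_instance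

-- ===== CLAIM (what is proved, stated in full; the proofs are below) =====
def Claim_equal_get_domain_vfs_hotplug_status : Prop := ∀ (status_dict : List (String × List String)) (test_vfs_in_iod : List (String × String)), Dom_get_domain_vfs_hotplug_status status_dict test_vfs_in_iod → Pre_get_domain_vfs_hotplug_status status_dict test_vfs_in_iod → Spec_get_domain_vfs_hotplug_status status_dict test_vfs_in_iod (get_domain_vfs_hotplug_status status_dict test_vfs_in_iod)

-- ===== LEMMAS AND PROOFS =====

-- A's counter loop over the lead statuses computes the two counts of the status list.
lemma pvFold_count (l : List String) (a b : Int) :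
    l.foldl pvStep (a, b)
    = (a + (l.count "OFFLINE" : Int), b + (l.count "MAINTENANCE-SUSPENDED" : Int)) := by
  induction l generalizing a b with
  | nil => simp
  | cons x xs ih =>
    rw [List.foldl_cons]
    by_cases h1 : x = "OFFLINE"
    · rw [show pvStep (a, b) x = (a + 1, b) by simp [pvStep, h1]]
      rw [ih]; simp [h1]; ring
    · by_cases h2 : x = "MAINTENANCE-SUSPENDED"
      · rw [show pvStep (a, b) x = (a, b + 1) by simp [pvStep, h2]]
        rw [ih]; simp [h2]; ring
      · rw [show pvStep (a, b) x = (a, b) by simp [pvStep, h1, h2]]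
        rw [ih]; simp [h1, h2]

-- The two decision ladders agree: counts of a list against its length vs. membership /
-- set-equality over the set of its elements.
lemma pvLadders (L : List String) (n : Nat) (hn : n = L.length) :
    (if (L.count "MAINTENANCE-SUSPENDED" : Int) = 0 then
       (if (L.count "OFFLINE" : Int) = 0 then "ONLINE"
        else if (L.count "OFFLINE" : Int) = (n : Int) then "OFFLINE"
        else "MIX-OFFLNE")
     else if (L.count "MAINTENANCE-SUSPENDED" : Int) = (n : Int) then "MAINTENANCE-SUSPENDED"
     else "MIX-MAINTENANCE-SUSPENDED")
    = (if (PySem.Set.ofList L).contains "MAINTENANCE-SUSPENDED" = true then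
         (if (PySem.Set.ofList L).equal ["MAINTENANCE-SUSPENDED"] = true then "MAINTENANCE-SUSPENDED"
          else "MIX-MAINTENANCE-SUSPENDED")
       else if (PySem.Set.ofList L).contains "OFFLINE" = false then "ONLINE"
       else if (PySem.Set.ofList L).equal ["OFFLINE"] = true then "OFFLINE"
       else "MIX-OFFLNE") := by
  subst hn
  have hO : ((L.count "OFFLINE" : Int) = 0) ↔ "OFFLINE" ∉ L := by
    simp [List.count_eq_zero]
  have hOn : ((L.count "OFFLINE" : Int) = (L.length : Int)) ↔ ∀ b ∈ L, "OFFLINE" = b := by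
    rw [Int.natCast_inj, List.count_eq_length]
  have hM : ((L.count "MAINTENANCE-SUSPENDED" : Int) = 0) ↔ "MAINTENANCE-SUSPENDED" ∉ L := by
    simp [List.count_eq_zero]
  have hMn : ((L.count "MAINTENANCE-SUSPENDED" : Int) = (L.length : Int)) ↔ ∀ b ∈ L, "MAINTENANCE-SUSPENDED" = b := by
    rw [Int.natCast_inj, List.count_eq_length]
  have hcO : ((PySem.Set.ofList L).contains "OFFLINE" = false) ↔ "OFFLINE" ∉ L := by
    simp [pysem]
  have hcM : ((PySem.Set.ofList L).contains "MAINTENANCE-SUSPENDED" = true) ↔ "MAINTENANCE-SUSPENDED" ∈ L := by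
    simp [pysem]
  have heO : ((PySem.Set.ofList L).equal ["OFFLINE"] = true) ↔ ("OFFLINE" ∈ L ∧ ∀ b ∈ L, "OFFLINE" = b) := by
    rw [PySem.Set.equal_iff]
    constructor
    · intro h
      refine ⟨by simpa [PySem.Set.mem_ofList] using (h "OFFLINE").2 (by simp), fun b hb => ?_⟩
      have := (h b).1 (by simpa [PySem.Set.mem_ofList] using hb)
      simp at this; exact this.symm
    · intro ⟨h1, h2⟩ x
      simp only [PySem.Set.mem_ofList, List.mem_singleton]
      exact ⟨fun hx => (h2 x hx).symm, fun hx => hx ▸ h1⟩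
  have heM : ((PySem.Set.ofList L).equal ["MAINTENANCE-SUSPENDED"] = true) ↔ ("MAINTENANCE-SUSPENDED" ∈ L ∧ ∀ b ∈ L, "MAINTENANCE-SUSPENDED" = b) := by
    rw [PySem.Set.equal_iff]
    constructor
    · intro h
      refine ⟨by simpa [PySem.Set.mem_ofList] using (h "MAINTENANCE-SUSPENDED").2 (by simp), fun b hb => ?_⟩
      have := (h b).1 (by simpa [PySem.Set.mem_ofList] using hb)
      simp at this; exact this.symm
    · intro ⟨h1, h2⟩ x
      simp only [PySem.Set.mem_ofList, List.mem_singleton]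
      exact ⟨fun hx => (h2 x hx).symm, fun hx => hx ▸ h1⟩
  simp only [hO, hOn, hM, hMn, hcO, hcM, heO, heM]
  clear hO hOn hM hMn hcO hcM heO heM
  split_ifs <;> first | rfl | tauto

theorem get_domain_vfs_hotplug_status_spec : Claim_equal_get_domain_vfs_hotplug_status := by
  intro status_dict test_vfs_in_iod _ _
  unfold Spec_get_domain_vfs_hotplug_status
  unfold get_domain_vfs_hotplug_status get_domain_vfs_hotplug_status_alt
  dsimp only
  rw [show (PySem.Dict.ofList test_vfs_in_iod).items.foldl
        (fun acc p => pvStep acc (pvLead (PySem.Dict.ofList status_dict) p.1)) ((0:Int), (0:Int))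
      = (((PySem.Dict.ofList test_vfs_in_iod).keys.map
            (fun vf => pvLead (PySem.Dict.ofList status_dict) vf)).foldl pvStep ((0:Int), (0:Int))) by
    rw [show (PySem.Dict.ofList test_vfs_in_iod).keys
        = (PySem.Dict.ofList test_vfs_in_iod).items.map Prod.fst from rfl,
      List.map_map, List.foldl_map]
    rfl]
  rw [pvFold_count]
  simp only [zero_add]
  exact pvLadders _ _ (by simp)
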